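-- pv_equiv track=rewrite | github.com/skwashd/phaeton | n8n-to-sfn/src/n8n_to_sfn/engine.py | _find_fork_point
-- ===== SOURCE A (Python) =====
-- def _find_fork_point(
--     merge_name: str,
--     incoming: list[str],
--     predecessors: dict[str, list[str]],
-- ) -> str | None:
--     """Walk backwards from each incoming branch to find the common fork point.
--
--     Returns the first common ancestor node of all incoming branches, or
--     ``None`` if no common ancestor is found within a reasonable depth.
--     """
--     max_depth = 50
--
--     def _ancestors(start: str) -> list[str]:
--         """Return the ancestor chain from *start* going backwards."""
--         chain: list[str] = [start]
--         current = start
--         for _ in range(max_depth):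
--             preds = predecessors.get(current, [])
--             if not preds:
--                 break
--             current = preds[0]
--             chain.append(current)
--         return chain
--
--     ancestor_chains = [_ancestors(node) for node in incoming]
--
--     # Find the first node that appears in all chains
--     first_chain_set = set(ancestor_chains[0])
--     for ancestor in ancestor_chains[0]:
--         if (
--             ancestor in first_chain_set
--             and all(ancestor in set(chain) for chain in ancestor_chains[1:])
--         ):
--             return ancestor
--     return None
-- ===== SOURCE B (Python) =====
-- def _find_fork_point(
--     merge_name: str,
--     incoming: list[str],
--     predecessors: dict[str, list[str]],
-- ) -> str | None:
--     """Frequency-table variant: count in how many chains each node occurs,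
--     then return the first node of the first chain present in all chains."""
--     max_depth = 50
--
--     def _ancestors(start: str) -> list[str]:
--         chain: list[str] = [start]
--         current = start
--         for _ in range(max_depth):
--             preds = predecessors.get(current, [])
--             if not preds:
--                 break
--             current = preds[0]
--             chain.append(current)
--         return chain
--
--     chains = [_ancestors(node) for node in incoming]
--
--     counts: dict[str, int] = {}
--     for chain in chains:
--         for node in set(chain):
--             counts[node] = counts.get(node, 0) + 1
--
--     for ancestor in chains[0]:
--         if counts.get(ancestor, 0) == len(chains):
--             return ancestor
--     return None
-- ===== Notes on version B (the rewrite author's own statement) =====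
-- stated objective: alternative
-- what changed: Replaced A's per-ancestor rescan of every other chain (all(ancestor in set(chain) for chain in chains[1:])) with a frequency table built in one pass (count of chains containing each node), then a single linear scan of the first chain for the first node whose count equals the number of chains.
import Mathlib
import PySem

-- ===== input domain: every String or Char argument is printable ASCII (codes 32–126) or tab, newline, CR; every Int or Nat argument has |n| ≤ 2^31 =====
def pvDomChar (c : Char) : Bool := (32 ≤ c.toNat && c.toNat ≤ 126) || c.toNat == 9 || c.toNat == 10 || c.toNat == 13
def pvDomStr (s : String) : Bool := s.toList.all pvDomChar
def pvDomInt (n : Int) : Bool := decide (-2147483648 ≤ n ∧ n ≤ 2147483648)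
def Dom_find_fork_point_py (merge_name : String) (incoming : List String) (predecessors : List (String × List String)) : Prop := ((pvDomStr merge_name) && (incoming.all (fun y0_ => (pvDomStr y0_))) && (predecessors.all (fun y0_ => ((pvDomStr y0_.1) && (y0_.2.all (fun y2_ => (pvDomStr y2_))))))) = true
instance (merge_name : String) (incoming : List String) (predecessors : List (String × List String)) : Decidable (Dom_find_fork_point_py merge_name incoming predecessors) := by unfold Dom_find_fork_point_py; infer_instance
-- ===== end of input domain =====

-- B replaces A's per-node rescan of every other chain ('all(ancestor in set(chain) …)')
-- by one frequency table counting in how many chains each node occurs (objective: alternative).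

-- ===== PORT A =====
-- inner function _ancestors: walk preds[0] links for at most max_depth = 50 steps
def pvAncWalk (predecessors : PySem.Dict String (List String)) : Nat → String → List String → List String
  | 0, _, chain => chain
  | n + 1, current, chain =>
    match PySem.Dict.getD predecessors current [] with
    | [] => chain
    | p :: _ => pvAncWalk predecessors n p (chain ++ [p])

def pvAncestors (predecessors : PySem.Dict String (List String)) (start : String) : List String :=
  pvAncWalk predecessors 50 start [start]

-- A's search loop over the first chain
def pvSearchA (first_chain_set : PySem.Set String) (rest : List (List String)) : List String → Option String
  | [] => none
  | a :: t =>
    if PySem.Set.contains first_chain_set a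
        && rest.all (fun chain => PySem.Set.contains (PySem.Set.ofList chain) a)
    then some a else pvSearchA first_chain_set rest t

def find_fork_point_py (merge_name : String) (incoming : List String) (predecessors : List (String × List String)) : Option String :=
  let d := PySem.Dict.mk predecessors
  let ancestor_chains := incoming.map (pvAncestors d)
  match ancestor_chains with
  | [] => none   -- Python raises IndexError here (ancestor_chains[0]); excluded by Pre_
  | c0 :: rest => pvSearchA (PySem.Set.ofList c0) rest c0

-- ===== PORT B =====
-- B's frequency table: counts[node] = number of chains whose set contains node
def pvCountsB (chains : List (List String)) : PySem.Dict String Int :=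
  chains.foldl
    (fun counts chain =>
      (PySem.Set.ofList chain).foldl (fun counts node => counts.modify node 0 (· + 1)) counts)
    PySem.Dict.empty

-- B's search loop: first node of the first chain counted in every chain
def pvSearchB (counts : PySem.Dict String Int) (n : Int) : List String → Option String
  | [] => none
  | a :: t => if PySem.Dict.getD counts a 0 == n then some a else pvSearchB counts n t

def find_fork_point_py_alt (merge_name : String) (incoming : List String) (predecessors : List (String × List String)) : Option String :=
  let d := PySem.Dict.mk predecessors
  let chains := incoming.map (pvAncestors d)
  let counts := pvCountsB chains
  match chains with
  | [] => none   -- Python raises IndexError here (chains[0]); excluded by Pre_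
  | c0 :: _ => pvSearchB counts (chains.length : Int) c0

-- ===== PRECONDITION & SPEC =====
-- Pre_ excludes only empty 'incoming', on which both Pythons raise IndexError at chains[0].
def Pre_find_fork_point_py (merge_name : String) (incoming : List String) (predecessors : List (String × List String)) : Prop :=
  incoming ≠ []
instance (merge_name : String) (incoming : List String) (predecessors : List (String × List String)) : Decidable (Pre_find_fork_point_py merge_name incoming predecessors) := by unfold Pre_find_fork_point_py; infer_instance

def pvWitness_find_fork_point_py : String × List String × (List (String × List String)) :=
  ("m", ["a", "b"], [("a", ["c"]), ("b", ["c"])])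

def Spec_find_fork_point_py (merge_name : String) (incoming : List String) (predecessors : List (String × List String)) (out : Option String) : Prop := out = find_fork_point_py_alt merge_name incoming predecessors
instance (merge_name : String) (incoming : List String) (predecessors : List (String × List String)) (out : Option String) : Decidable (Spec_find_fork_point_py merge_name incoming predecessors out) := by unfold Spec_find_fork_point_py; infer_instance

-- ===== CLAIM (what is proved, stated in full; the proofs are below) =====
def Claim_equal_find_fork_point_py : Prop := ∀ (merge_name : String) (incoming : List String) (predecessors : List (String × List String)), Dom_find_fork_point_py merge_name incoming predecessors → Pre_find_fork_point_py merge_name incoming predecessors → Spec_find_fork_point_py merge_name incoming predecessors (find_fork_point_py merge_name incoming predecessors)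

-- ===== LEMMAS AND PROOFS =====

-- the frequency table counts, for each node, the number of chains containing it
theorem pvCountsB_getD (chains : List (List String)) (a : String) :
    (pvCountsB chains).getD a 0 = (chains.countP (fun c => decide (a ∈ c)) : Int) := by
  suffices h : ∀ (l : List (List String)) (d : PySem.Dict String Int),
      (l.foldl (fun counts chain =>
        (PySem.Set.ofList chain).foldl (fun counts node => counts.modify node 0 (· + 1)) counts) d).getD a 0
      = d.getD a 0 + (l.countP (fun c => decide (a ∈ c)) : Int) by
    simpa [pvCountsB] using h chains PySem.Dict.empty
  intro l
  induction l with
  | nil => intro d; simp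
  | cons c t ih =>
    intro d
    rw [List.foldl_cons, ih, PySem.Dict.getD_foldl_modify_add_one]
    have hcount : ((PySem.Set.ofList c).count a : Int) = if a ∈ c then 1 else 0 := by
      by_cases h : a ∈ c
      · rw [List.count_eq_one_of_mem (PySem.Set.nodup_ofList c) ((PySem.Set.mem_ofList c a).mpr h)]
        simp [h]
      · rw [List.count_eq_zero_of_not_mem (fun hc => h ((PySem.Set.mem_ofList c a).mp hc))]
        simp [h]
    rw [hcount, List.countP_cons]
    by_cases h : a ∈ c <;> simp [h] <;> push_cast <;> ring

-- A's membership test over all chains equals B's count-equals-length test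
theorem pv_cond_eq (c0 : List String) (rest : List (List String)) (a : String) :
    (PySem.Set.contains (PySem.Set.ofList c0) a
      && rest.all (fun chain => PySem.Set.contains (PySem.Set.ofList chain) a))
    = (PySem.Dict.getD (pvCountsB (c0 :: rest)) a 0 == ((c0 :: rest).length : Int)) := by
  rw [Bool.eq_iff_iff]
  rw [pvCountsB_getD]
  have hcast : ((c0 :: rest).countP (fun c => decide (a ∈ c)) : Int) = ((c0 :: rest).length : Int)
      ↔ (c0 :: rest).countP (fun c => decide (a ∈ c)) = (c0 :: rest).length := by
    exact_mod_cast Iff.rfl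
  simp only [beq_iff_eq, hcast, List.countP_eq_length]
  simp [PySem.Set.mem_ofList, List.all_eq_true]

-- the two search loops agree on every traversal list
theorem pv_search_eq (c0 : List String) (rest : List (List String)) (l : List String) :
    pvSearchA (PySem.Set.ofList c0) rest l
      = pvSearchB (pvCountsB (c0 :: rest)) (((c0 :: rest).length : Nat) : Int) l := by
  induction l with
  | nil => rfl
  | cons a t ih =>
    rw [pvSearchA, pvSearchB, pv_cond_eq c0 rest a, ih]

-- ===== VERDICT (by name: the statement is the Claim_ definition above) =====
theorem find_fork_point_py_spec : Claim_equal_find_fork_point_py := by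
  intro merge_name incoming predecessors _ hpre
  unfold Spec_find_fork_point_py find_fork_point_py find_fork_point_py_alt
  cases incoming with
  | nil => exact absurd rfl hpre
  | cons i is =>
    simp only [List.map_cons]
    exact pv_search_eq _ _ _
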